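-- pv_equiv track=rewrite | github.com/key-moon/golf | deflate_optimizer.py | rle_code_lengths_stream
-- ===== SOURCE A (Python) =====
-- from typing import List, Sequence, Tuple, Dict, Optional, Callable, Iterable
--
-- def rle_code_lengths_stream(litlen: List[int], dist: List[int]) -> List[Tuple[int,int,int]]:
--     """
--     litlen + dist のコード長列を RFC1951 の RLE で列挙。
--     返値は (symbol, extra_value, extra_bits):
--       - 0..15 : そのままコード長値
--       - 16    : 直前の長さを 3..6 回繰り返す（2 ビットで回数-3 を表す）
--       - 17    : 0 を 3..10 回
--       - 18    : 0 を 11..138 回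
--     """
--     seq = list(litlen) + list(dist)
--     out: List[Tuple[int,int,int]] = []
--     i = 0
--     while i < len(seq):
--         cur = seq[i]
--         # 連長
--         run = 1
--         j = i + 1
--         while j < len(seq) and seq[j] == cur:
--             run += 1; j += 1
--
--         if cur == 0:
--             k = run
--             while k >= 11:
--                 use = min(138, k)
--                 out.append((18, use - 11, 7))
--                 k -= use
--             if k >= 3:
--                 out.append((17, k - 3, 3))
--                 k = 0
--             # 残り 0..2 個はリテラル 0 をその数だけ
--             out.extend([(0, 0, 0)] * k)
--         else:
--             # まず 1 個はリテラルで出す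
--             out.append((cur, 0, 0))
--             k = run - 1
--             # 3..6 は 16 を使う
--             while k >= 6:
--                 out.append((16, 3, 2))  # 6回 → extra=6-3=3
--                 k -= 6
--             if k >= 3:
--                 out.append((16, k - 3, 2))
--                 k = 0
--             # 残り 1..2 回はリテラルで出す（← これが修正点）
--             out.extend([(cur, 0, 0)] * k)
--
--         i = j
--
--     return out
-- ===== SOURCE B (Python) =====
-- from typing import List, Tuple
--
-- def rle_code_lengths_stream(litlen: List[int], dist: List[int]) -> List[Tuple[int,int,int]]:
--     # Scan the REVERSED sequence and build the output BACK-TO-FRONT: each run's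
--     # codes are emitted in reverse order (closed-form divmod for the chunk counts),
--     # then one final reversal yields the stream.
--     rev = (list(litlen) + list(dist))[::-1]
--     out_rev: List[Tuple[int,int,int]] = []
--     i = 0
--     while i < len(rev):
--         v = rev[i]
--         j = i
--         while j < len(rev) and rev[j] == v:
--             j += 1
--         n = j - i
--         if v == 0:
--             q, r = divmod(n, 138)
--             if r >= 11:
--                 out_rev.append((18, r - 11, 7))
--             elif r >= 3:
--                 out_rev.append((17, r - 3, 3))
--             else:
--                 out_rev.extend([(0, 0, 0)] * r)
--             out_rev.extend([(18, 127, 7)] * q)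
--         else:
--             q, r = divmod(n - 1, 6)
--             if r >= 3:
--                 out_rev.append((16, r - 3, 2))
--             else:
--                 out_rev.extend([(v, 0, 0)] * r)
--             out_rev.extend([(16, 3, 2)] * q)
--             out_rev.append((v, 0, 0))
--         i = j
--     out_rev.reverse()
--     return out_rev
-- ===== Notes on version B (the rewrite author's own statement) =====
-- stated objective: alternative
-- what changed: B traverses the REVERSED sequence and builds the output back-to-front (each run's codes emitted in reverse, chunk counts by closed-form divmod instead of A's greedy repeated-subtraction loops), then reverses once at the end.
import Mathlib
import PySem

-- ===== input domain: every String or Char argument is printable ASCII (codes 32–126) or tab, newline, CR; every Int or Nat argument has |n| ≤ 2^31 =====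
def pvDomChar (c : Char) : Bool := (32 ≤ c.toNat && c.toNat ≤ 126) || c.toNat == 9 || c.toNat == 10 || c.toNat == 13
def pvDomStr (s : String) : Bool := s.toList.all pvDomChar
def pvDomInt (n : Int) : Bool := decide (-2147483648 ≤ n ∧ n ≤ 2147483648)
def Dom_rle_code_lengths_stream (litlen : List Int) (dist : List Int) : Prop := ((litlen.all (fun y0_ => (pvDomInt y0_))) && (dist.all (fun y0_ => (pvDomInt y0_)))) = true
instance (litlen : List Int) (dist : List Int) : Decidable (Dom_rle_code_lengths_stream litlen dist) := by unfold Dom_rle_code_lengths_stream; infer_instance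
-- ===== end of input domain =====

-- B scans the reversed sequence and builds the output back-to-front (closed-form divmod per run), then reverses once; alternative decomposition, same cost.


-- ===== PORT A =====
-- inner while: length of the equal prefix of the rest of seq (run = 1 + this)
def pvCountEq (cur : Int) : List Int → Nat
  | [] => 0
  | y :: ys => if y == cur then pvCountEq cur ys + 1 else 0

-- the suffix of seq starting at j (end of the run)
def pvDropEq (cur : Int) : List Int → List Int
  | [] => []
  | y :: ys => if y == cur then pvDropEq cur ys else y :: ys

theorem pvDropEq_length_le (cur : Int) (xs : List Int) : (pvDropEq cur xs).length ≤ xs.length := by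
  induction xs with
  | nil => simp [pvDropEq]
  | cons y ys ih =>
    simp only [pvDropEq]
    split
    · simp_all; omega
    · simp

-- A's zero branch: while k >= 11 emit 18-code; then 17-code if k >= 3; then literal zeros
def pvZeroEmit (k : Nat) : List (Int × Int × Int) :=
  if 11 ≤ k then
    (18, ((min 138 k : Nat) : Int) - 11, 7) :: pvZeroEmit (k - min 138 k)
  else if 3 ≤ k then [(17, (k : Int) - 3, 3)]
  else List.replicate k (0, 0, 0)
decreasing_by omega

-- A's nonzero branch after the first literal: while k >= 6 emit (16,3,2); then 16-code if k >= 3; then literals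
def pvRepEmit (cur : Int) (k : Nat) : List (Int × Int × Int) :=
  if 6 ≤ k then (16, 3, 2) :: pvRepEmit cur (k - 6)
  else if 3 ≤ k then [(16, (k : Int) - 3, 2)]
  else List.replicate k (cur, 0, 0)
decreasing_by omega

-- A's outer while over i, expressed on the suffix of seq starting at i
def pvALoop : List Int → List (Int × Int × Int)
  | [] => []
  | cur :: rest =>
    let run := 1 + pvCountEq cur rest
    (if cur == 0 then pvZeroEmit run else (cur, 0, 0) :: pvRepEmit cur (run - 1)) ++
      pvALoop (pvDropEq cur rest)
termination_by xs => xs.length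
decreasing_by exact Nat.lt_succ_of_le (pvDropEq_length_le cur rest)

def rle_code_lengths_stream (litlen : List Int) (dist : List Int) : List (Int × Int × Int) :=
  pvALoop (litlen ++ dist)

-- ===== PORT B =====
-- Source B's run body: the codes of one run of value v, count n, in REVERSED order (divmod closed form)
def pvEmitRev (v : Int) (n : Nat) : List (Int × Int × Int) :=
  if v == 0 then
    (if 11 ≤ n % 138 then [((18 : Int), ((n % 138 : Nat) : Int) - 11, 7)]
     else if 3 ≤ n % 138 then [((17 : Int), ((n % 138 : Nat) : Int) - 3, 3)]
     else List.replicate (n % 138) ((0 : Int), 0, 0)) ++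
      List.replicate (n / 138) (18, 127, 7)
  else
    (if 3 ≤ (n - 1) % 6 then [((16 : Int), (((n - 1) % 6 : Nat) : Int) - 3, 2)]
     else List.replicate ((n - 1) % 6) (v, 0, 0)) ++
      List.replicate ((n - 1) / 6) (16, 3, 2) ++ [(v, 0, 0)]

-- Source B's outer while over the reversed sequence, building out_rev run by run
def pvBLoop : List Int → List (Int × Int × Int)
  | [] => []
  | v :: rest =>
    pvEmitRev v ((rest.takeWhile (fun y => y == v)).length + 1) ++
      pvBLoop (rest.dropWhile (fun y => y == v))
termination_by xs => xs.length
decreasing_by exact Nat.lt_succ_of_le (rest.length_dropWhile_le _)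

def rle_code_lengths_stream_alt (litlen : List Int) (dist : List Int) : List (Int × Int × Int) :=
  (pvBLoop ((litlen ++ dist).reverse)).reverse

-- ===== PRECONDITION & SPEC =====
def Spec_rle_code_lengths_stream (litlen : List Int) (dist : List Int) (out : List (Int × Int × Int)) : Prop := out = rle_code_lengths_stream_alt litlen dist
instance (litlen : List Int) (dist : List Int) (out : List (Int × Int × Int)) : Decidable (Spec_rle_code_lengths_stream litlen dist out) := by unfold Spec_rle_code_lengths_stream; infer_instance

-- ===== CLAIM (what is proved, stated in full; the proofs are below) =====
def Claim_equal_rle_code_lengths_stream : Prop := ∀ (litlen : List Int) (dist : List Int), Dom_rle_code_lengths_stream litlen dist → Spec_rle_code_lengths_stream litlen dist (rle_code_lengths_stream litlen dist)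

-- ===== LEMMAS AND PROOFS =====
-- proof-side run list (value, count) of a sequence
def pvRuns : List Int → List (Int × Nat)
  | [] => []
  | x :: xs =>
    (x, (xs.takeWhile (fun y => y == x)).length + 1) :: pvRuns (xs.dropWhile (fun y => y == x))
termination_by xs => xs.length
decreasing_by exact Nat.lt_succ_of_le (xs.length_dropWhile_le _)

-- proof-side forward emission of a run (closed form of A's per-run output)
def pvEmit (p : Int × Nat) : List (Int × Int × Int) :=
  if p.1 == 0 then
    List.replicate (p.2 / 138) (18, 127, 7) ++
      (if 11 ≤ p.2 % 138 then [(18, ((p.2 % 138 : Nat) : Int) - 11, 7)]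
       else if 3 ≤ p.2 % 138 then [(17, ((p.2 % 138 : Nat) : Int) - 3, 3)]
       else List.replicate (p.2 % 138) (0, 0, 0))
  else
    (p.1, 0, 0) ::
      (List.replicate ((p.2 - 1) / 6) (16, 3, 2) ++
        (if 3 ≤ (p.2 - 1) % 6 then [(16, (((p.2 - 1) % 6 : Nat) : Int) - 3, 2)]
         else List.replicate ((p.2 - 1) % 6) (p.1, 0, 0)))

theorem pvCountEq_eq_takeWhile (cur : Int) (xs : List Int) :
    pvCountEq cur xs = (xs.takeWhile (fun y => y == cur)).length := by
  induction xs with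
  | nil => simp [pvCountEq]
  | cons y ys ih =>
    simp only [pvCountEq, List.takeWhile_cons]
    by_cases hy : (y == cur) = true <;> simp [hy, ih]

theorem pvDropEq_eq_dropWhile (cur : Int) (xs : List Int) :
    pvDropEq cur xs = xs.dropWhile (fun y => y == cur) := by
  induction xs with
  | nil => simp [pvDropEq]
  | cons y ys ih =>
    simp only [pvDropEq, List.dropWhile_cons]
    by_cases hy : (y == cur) = true <;> simp [hy, ih]

theorem pvZeroEmit_closed (k : Nat) :
    pvZeroEmit k =
      List.replicate (k / 138) (18, 127, 7) ++
        (if 11 ≤ k % 138 then [((18 : Int), ((k % 138 : Nat) : Int) - 11, 7)]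
         else if 3 ≤ k % 138 then [(17, ((k % 138 : Nat) : Int) - 3, 3)]
         else List.replicate (k % 138) (0, 0, 0)) := by
  induction k using Nat.strong_induction_on with
  | _ k ih =>
    by_cases h : 138 ≤ k
    · have hmin : min 138 k = 138 := by omega
      rw [pvZeroEmit, if_pos (by omega : 11 ≤ k), hmin, ih (k - 138) (by omega),
          (by omega : k / 138 = (k - 138) / 138 + 1), (by omega : k % 138 = (k - 138) % 138)]
      rw [List.replicate_succ, List.cons_append]
      congr 1
    · by_cases h2 : 11 ≤ k
      · have hmin : min 138 k = k := by omega
        rw [pvZeroEmit, if_pos h2, hmin, (by omega : k - k = 0),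
            (by omega : k / 138 = 0), (by omega : k % 138 = k), if_pos h2,
            pvZeroEmit, if_neg (by omega : ¬ (11 : Nat) ≤ 0), if_neg (by omega : ¬ (3 : Nat) ≤ 0)]
        simp
      · rw [pvZeroEmit, if_neg (by omega), (by omega : k / 138 = 0),
            (by omega : k % 138 = k), if_neg h2]
        simp

theorem pvRepEmit_closed (cur : Int) (k : Nat) :
    pvRepEmit cur k =
      List.replicate (k / 6) (16, 3, 2) ++
        (if 3 ≤ k % 6 then [((16 : Int), ((k % 6 : Nat) : Int) - 3, 2)]
         else List.replicate (k % 6) (cur, 0, 0)) := by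
  induction k using Nat.strong_induction_on with
  | _ k ih =>
    by_cases h : 6 ≤ k
    · rw [pvRepEmit, if_pos h, ih (k - 6) (by omega),
          (by omega : k / 6 = (k - 6) / 6 + 1), (by omega : k % 6 = (k - 6) % 6)]
      simp [List.replicate_succ]
    · rw [pvRepEmit, if_neg (by omega), (by omega : k / 6 = 0), (by omega : k % 6 = k)]
      simp

theorem pvEmit_head (cur : Int) (rest : List Int) :
    (if cur == 0 then pvZeroEmit (1 + pvCountEq cur rest)
     else (cur, 0, 0) :: pvRepEmit cur (1 + pvCountEq cur rest - 1)) =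
    pvEmit (cur, (rest.takeWhile (fun y => y == cur)).length + 1) := by
  rw [pvEmit, pvCountEq_eq_takeWhile]
  by_cases hc : cur = 0
  · simp only [hc, beq_self_eq_true, if_true]
    rw [pvZeroEmit_closed, Nat.add_comm]
  · have hb : (cur == 0) = false := by simp [hc]
    simp only [hb, Bool.false_eq_true, if_false]
    rw [pvRepEmit_closed]
    norm_num

theorem pvALoop_eq_aux (n : Nat) : ∀ seq : List Int, seq.length ≤ n →
    pvALoop seq = (pvRuns seq).flatMap pvEmit := by
  induction n with
  | zero =>
    intro seq h
    have : seq = [] := List.length_eq_zero_iff.mp (by omega)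
    subst this; simp [pvALoop, pvRuns]
  | succ n ih =>
    intro seq h
    match seq with
    | [] => simp [pvALoop, pvRuns]
    | cur :: rest =>
      rw [pvALoop, pvRuns]
      simp only [List.flatMap_cons, pvDropEq_eq_dropWhile]
      rw [ih (rest.dropWhile (fun y => y == cur))
            (le_trans (rest.length_dropWhile_le _) (by simpa using h))]
      congr 1
      exact pvEmit_head cur rest

theorem pvALoop_eq (seq : List Int) : pvALoop seq = (pvRuns seq).flatMap pvEmit :=
  pvALoop_eq_aux seq.length seq le_rfl

-- B's loop, run-wise
theorem pvBLoop_eq_aux (n : Nat) : ∀ ys : List Int, ys.length ≤ n →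
    pvBLoop ys = (pvRuns ys).flatMap (fun p => pvEmitRev p.1 p.2) := by
  induction n with
  | zero =>
    intro ys h
    have : ys = [] := List.length_eq_zero_iff.mp (by omega)
    subst this; simp [pvBLoop, pvRuns]
  | succ n ih =>
    intro ys h
    match ys with
    | [] => simp [pvBLoop, pvRuns]
    | v :: rest =>
      rw [pvBLoop, pvRuns]
      simp only [List.flatMap_cons]
      rw [ih (rest.dropWhile (fun y => y == v))
            (le_trans (rest.length_dropWhile_le _) (by simpa using h))]

theorem pvBLoop_eq (ys : List Int) :
    pvBLoop ys = (pvRuns ys).flatMap (fun p => pvEmitRev p.1 p.2) :=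
  pvBLoop_eq_aux ys.length ys le_rfl

-- the reversed per-run emission reverses to the forward one
theorem pvEmitRev_reverse (v : Int) (n : Nat) :
    (pvEmitRev v n).reverse = pvEmit (v, n) := by
  rw [pvEmitRev, pvEmit]
  by_cases hv : (v == 0) = true
  · simp only [hv, if_true]
    rw [List.reverse_append, List.reverse_replicate]
    congr 1
    split_ifs <;> simp
  · simp only [hv, Bool.false_eq_true, if_false]
    simp only [List.reverse_append, List.reverse_replicate, List.reverse_cons,
      List.reverse_nil, List.nil_append, List.append_assoc, List.singleton_append]
    congr 2
    split_ifs <;> simp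

-- runs of the reverse are the reversed runs
theorem pvRuns_replicate (v : Int) (n : Nat) (hn : 0 < n) :
    pvRuns (List.replicate n v) = [(v, n)] := by
  obtain ⟨m, rfl⟩ : ∃ m, n = m + 1 := ⟨n - 1, by omega⟩
  rw [List.replicate_succ, pvRuns]
  have ht : (List.replicate m v).takeWhile (fun y => y == v) = List.replicate m v := by
    apply List.takeWhile_eq_self_iff.mpr; intro a ha
    simp [List.eq_of_mem_replicate ha]
  have hd : (List.replicate m v).dropWhile (fun y => y == v) = [] := by
    have := List.takeWhile_append_dropWhile (p := fun y => y == v) (l := List.replicate m v)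
    have hlen := congrArg List.length this
    rw [ht] at this
    simpa using List.append_left_cancel this
  rw [ht, hd]
  simp [pvRuns]

theorem takeWhile_all_append (p : Int → Bool) (t z : List Int) (ht : ∀ a ∈ t, p a = true) :
    (t ++ z).takeWhile p = t ++ z.takeWhile p ∧ (t ++ z).dropWhile p = z.dropWhile p := by
  induction t with
  | nil => simp
  | cons a t ih =>
    have ha : p a = true := ht a (by simp)
    have := ih (fun b hb => ht b (by simp [hb]))
    simp [List.takeWhile_cons, List.dropWhile_cons, ha, this.1, this.2]

theorem pvRuns_append_run_aux (N : Nat) : ∀ as : List Int, as.length ≤ N →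
    ∀ (v : Int) (n : Nat), 0 < n → (∀ w, as.getLast? = some w → w ≠ v) →
    pvRuns (as ++ List.replicate n v) = pvRuns as ++ [(v, n)] := by
  induction N with
  | zero =>
    intro as h v n hn _
    have : as = [] := List.length_eq_zero_iff.mp (by omega)
    subst this
    simp [pvRuns_replicate v n hn, pvRuns]
  | succ N ih =>
    intro as h v n hn hlast
    cases as with
    | nil => simp [pvRuns_replicate v n hn, pvRuns]
    | cons u rest =>
      have htall : ∀ a ∈ rest.takeWhile (fun y => y == u), (a == u) = true :=
        fun a ha => List.mem_takeWhile_imp (p := fun y => y == u) ha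
      have hrest : rest.takeWhile (fun y => y == u) ++ rest.dropWhile (fun y => y == u) = rest :=
        List.takeWhile_append_dropWhile
      by_cases he : rest.dropWhile (fun y => y == u) = []
      · -- u :: rest is one run of u's, and u ≠ v
        have hreq : rest = List.replicate rest.length u := by
          apply List.eq_replicate_of_mem
          intro a ha
          rw [← hrest, he, List.append_nil] at ha
          simpa using htall a ha
        have huv : u ≠ v := by
          apply hlast
          rw [hreq, ← List.replicate_succ, List.getLast?_replicate]
          simp
        have hvu : (v == u) = false := by simp [Ne.symm huv]
        obtain ⟨m, rfl⟩ : ∃ m, n = m + 1 := ⟨n - 1, by omega⟩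
        have htw0 : (List.replicate (m + 1) v).takeWhile (fun y => y == u) = [] := by
          rw [List.replicate_succ, List.takeWhile_cons]
          simp [hvu]
        have hdw0 : (List.replicate (m + 1) v).dropWhile (fun y => y == u) = List.replicate (m + 1) v := by
          rw [List.replicate_succ, List.dropWhile_cons]
          simp [hvu]
        have htall' : ∀ a ∈ rest, (a == u) = true := by
          intro a ha
          rw [hreq] at ha
          simp [List.eq_of_mem_replicate ha]
        have hsplit := takeWhile_all_append (fun y => y == u) rest (List.replicate (m + 1) v) htall'
        rw [List.cons_append, pvRuns, hsplit.1, hsplit.2, htw0, hdw0,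
            pvRuns_replicate v (m + 1) (by omega), pvRuns,
            List.takeWhile_eq_self_iff.mpr htall']
        have hdrest : rest.dropWhile (fun y => y == u) = [] := he
        rw [hdrest]
        simp [pvRuns]
      · -- the first run is followed by more; recurse on the dropWhile suffix
        have hlen : (rest.dropWhile (fun y => y == u)).length ≤ N := by
          have h1 := rest.length_dropWhile_le (fun y => y == u)
          have h2 : rest.length ≤ N := by simpa using h
          omega
        have hlaste : ∀ w, (rest.dropWhile (fun y => y == u)).getLast? = some w → w ≠ v := by
          intro w hw
          apply hlast
          have : (u :: rest).getLast? = (rest.dropWhile (fun y => y == u)).getLast? := by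
            conv_lhs => rw [← hrest, ← List.cons_append]
            exact List.getLast?_append_of_ne_nil _ he
          rw [this]
          exact hw
        cases hE : rest.dropWhile (fun y => y == u) with
        | nil => exact absurd hE he
        | cons e0 e' =>
          have he0 : (e0 == u) = false := by
            have := List.head?_dropWhile_not (fun y => y == u) rest
            rw [hE] at this
            simpa using this
          have hsplit := takeWhile_all_append (fun y => y == u) (rest.takeWhile (fun y => y == u))
            ((e0 :: e') ++ List.replicate n v) htall
          have hsplit2 := takeWhile_all_append (fun y => y == u) (rest.takeWhile (fun y => y == u))
            (e0 :: e') htall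
          have harr : rest ++ List.replicate n v =
              rest.takeWhile (fun y => y == u) ++ ((e0 :: e') ++ List.replicate n v) := by
            rw [← List.append_assoc, ← hE, hrest]
          rw [List.cons_append, pvRuns, harr, hsplit.1, hsplit.2]
          have htwE : ((e0 :: e') ++ List.replicate n v).takeWhile (fun y => y == u) = [] := by
            simp [List.takeWhile_cons, he0]
          have hdwE : ((e0 :: e') ++ List.replicate n v).dropWhile (fun y => y == u) =
              (e0 :: e') ++ List.replicate n v := by
            simp [List.dropWhile_cons, he0]
          rw [htwE, hdwE, ih (e0 :: e') (hE ▸ hlen) v n hn (hE ▸ hlaste)]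
          conv_rhs => rw [pvRuns, hE]
          simp

theorem pvRuns_append_run (as : List Int) (v : Int) (n : Nat) (hn : 0 < n)
    (hlast : ∀ w, as.getLast? = some w → w ≠ v) :
    pvRuns (as ++ List.replicate n v) = pvRuns as ++ [(v, n)] :=
  pvRuns_append_run_aux as.length as le_rfl v n hn hlast

theorem pvRuns_reverse_aux (N : Nat) : ∀ xs : List Int, xs.length ≤ N →
    pvRuns xs.reverse = (pvRuns xs).reverse := by
  induction N with
  | zero =>
    intro xs h
    have : xs = [] := List.length_eq_zero_iff.mp (by omega)
    subst this
    simp [pvRuns]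
  | succ N ih =>
    intro xs h
    cases xs with
    | nil => simp [pvRuns]
    | cons v rest =>
      have htall : ∀ a ∈ rest.takeWhile (fun y => y == v), (a == v) = true :=
        fun a ha => List.mem_takeWhile_imp (p := fun y => y == v) ha
      have htrep : rest.takeWhile (fun y => y == v) =
          List.replicate (rest.takeWhile (fun y => y == v)).length v := by
        apply List.eq_replicate_of_mem
        intro a ha
        simpa using htall a ha
      have hrev : (v :: rest).reverse =
          (rest.dropWhile (fun y => y == v)).reverse ++
            List.replicate ((rest.takeWhile (fun y => y == v)).length + 1) v := by
        conv_lhs => rw [← List.takeWhile_append_dropWhile (p := fun y => y == v) (l := rest)]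
        rw [← List.cons_append, List.reverse_append, List.reverse_cons]
        conv_lhs => rw [htrep, List.reverse_replicate]
        rw [← List.replicate_succ']
      have hlast : ∀ w, (rest.dropWhile (fun y => y == v)).reverse.getLast? = some w → w ≠ v := by
        intro w hw
        rw [List.getLast?_reverse] at hw
        have := List.head?_dropWhile_not (fun y => y == v) rest
        rw [hw] at this
        simpa using this
      have hlen : (rest.dropWhile (fun y => y == v)).length ≤ N := by
        have h1 := rest.length_dropWhile_le (fun y => y == v)
        have h2 : rest.length ≤ N := by simpa using h
        omega
      rw [hrev,
          pvRuns_append_run ((rest.dropWhile (fun y => y == v)).reverse) v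
            ((rest.takeWhile (fun y => y == v)).length + 1) (by omega) hlast,
          ih (rest.dropWhile (fun y => y == v)) hlen]
      conv_rhs => rw [pvRuns]
      rw [List.reverse_cons]

theorem pvRuns_reverse (xs : List Int) : pvRuns xs.reverse = (pvRuns xs).reverse :=
  pvRuns_reverse_aux xs.length xs le_rfl

-- ===== VERDICT (by name: the statement is the Claim_ definition above) =====
theorem rle_code_lengths_stream_spec : Claim_equal_rle_code_lengths_stream := by
  intro litlen dist _
  unfold Spec_rle_code_lengths_stream rle_code_lengths_stream rle_code_lengths_stream_alt
  rw [pvBLoop_eq, pvRuns_reverse, List.reverse_flatMap, List.reverse_reverse, pvALoop_eq]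
  congr 1
  funext p
  exact (pvEmitRev_reverse p.1 p.2).symm
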